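-- pv_equiv track=rewrite | github.com/mahlpdx/nlp-group-project | tfidf.py | generate_terms
-- ===== SOURCE A (Python) =====
-- def generate_terms(document, n):
--     """Generate all single and multi-word terms needed
--     to generate tf-idf matrix
--
--     From paper: `Generate multi-word terms of length 1 to TL as follows.
--     For a document with DL words, there are DL single-word terms, DL
--     - 1 two word terms, and so on. Finally, we have DL - TL + 1 terms
--     with TL words.`
--
--     Inputs:
--         n (int): maximal number of words in a term
--         document (list<str>): document as a list of tokens
--
--     Return:
--         list<str>: list of all single and multi-word terms
--     """
--     terms = set()
--     if n == 1:
--         return set(document)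
--     elif n == 2:
--         for idx in range(1, len(document)):
--             terms.add("{} {}".format(document[idx-1], document[idx]))
--     elif n == 3:
--         for idx in range(2, len(document)):
--             terms.add("{} {} {}".format(
--                 document[idx-2], document[idx-1], document[idx])
--             )
--     else:
--         raise ("Max term allowed is 3")
--
--     return terms
-- ===== SOURCE B (Python) =====
-- def generate_terms(document, n):
--     if n == 1:
--         return set(document)
--     if n not in (2, 3):
--         raise ("Max term allowed is 3")
--     terms = set()
--     window = []
--     for token in document:
--         window.append(token)
--         if len(window) > n:
--             window.pop(0)
--         if len(window) == n:
--             terms.add(" ".join(window))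
--     return terms
-- ===== Notes on version B (the rewrite author's own statement) =====
-- stated objective: alternative
-- what changed: A's two hand-unrolled per-n indexed loops (with format templates) are replaced by one generic streaming pass that maintains a rolling window buffer (append token, pop the front when over-full, emit the joined window when full); n==1 and the raise branch are kept.
import Mathlib
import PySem

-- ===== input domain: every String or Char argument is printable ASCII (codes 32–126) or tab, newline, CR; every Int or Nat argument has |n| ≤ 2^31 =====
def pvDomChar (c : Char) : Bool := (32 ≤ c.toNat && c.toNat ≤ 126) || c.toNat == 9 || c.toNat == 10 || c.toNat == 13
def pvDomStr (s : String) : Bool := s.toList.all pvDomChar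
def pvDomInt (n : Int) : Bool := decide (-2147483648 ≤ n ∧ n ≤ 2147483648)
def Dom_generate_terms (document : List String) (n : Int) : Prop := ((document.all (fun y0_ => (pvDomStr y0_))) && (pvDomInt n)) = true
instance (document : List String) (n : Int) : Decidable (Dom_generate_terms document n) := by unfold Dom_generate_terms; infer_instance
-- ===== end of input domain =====

-- B replaces A's two per-n indexed loops with one streaming pass over the tokens that
-- maintains a rolling window buffer (append, pop front, emit when full); objective: alternative.

-- ===== PORT A =====
-- "{} {}".format(a, b) on strings is the space-joined concatenation: PySem.Str.join " " [a, b] (exact).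
def generate_terms (document : List String) (n : Int) : List String :=
  let terms : PySem.Set String := PySem.Set.empty
  if n = 1 then
    PySem.Set.ofList document
  else if n = 2 then
    (PySem.List.pyRange 1 (PySem.List.len document) 1).foldl
      (fun t idx => PySem.Set.add t
        (PySem.Str.join " " [PySem.List.pyGetD document (idx - 1) "", PySem.List.pyGetD document idx ""])) terms
  else if n = 3 then
    (PySem.List.pyRange 2 (PySem.List.len document) 1).foldl
      (fun t idx => PySem.Set.add t
        (PySem.Str.join " " [PySem.List.pyGetD document (idx - 2) "",
                             PySem.List.pyGetD document (idx - 1) "", PySem.List.pyGetD document idx ""])) terms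
  else
    terms  -- Python raises here; excluded by Pre_generate_terms

-- ===== PORT B =====
-- one pass, rolling window buffer: append token, pop front when over-full, emit when full
def generate_terms_alt (document : List String) (n : Int) : List String :=
  if n = 1 then
    PySem.Set.ofList document
  else if ¬ (n = 2 ∨ n = 3) then
    []  -- Python raises here; excluded by Pre_generate_terms
  else
    (document.foldl
      (fun (st : PySem.Set String × List String) token =>
        let w1 := st.2 ++ [token]
        let w2 := if (w1.length : Int) > n then w1.drop 1 else w1
        if (w2.length : Int) = n then (PySem.Set.add st.1 (PySem.Str.join " " w2), w2)
        else (st.1, w2))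
      (PySem.Set.empty, [])).1

-- ===== PRECONDITION & SPEC =====
-- A raises (a TypeError from `raise "Max term allowed is 3"`) for any n outside {1, 2, 3}.
def Pre_generate_terms (document : List String) (n : Int) : Prop := n = 1 ∨ n = 2 ∨ n = 3
instance (document : List String) (n : Int) : Decidable (Pre_generate_terms document n) := by unfold Pre_generate_terms; infer_instance
def pvWitness_generate_terms : List String × Int := (["a", "b", "a"], 2)

def Spec_generate_terms (document : List String) (n : Int) (out : List String) : Prop := out = generate_terms_alt document n
instance (document : List String) (n : Int) (out : List String) : Decidable (Spec_generate_terms document n out) := by unfold Spec_generate_terms; infer_instance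

-- ===== CLAIM (what is proved, stated in full; the proofs are below) =====
def Claim_equal_generate_terms : Prop := ∀ (document : List String) (n : Int), Dom_generate_terms document n → Pre_generate_terms document n → Spec_generate_terms document n (generate_terms document n)

-- ===== LEMMAS AND PROOFS =====

-- the last m elements of a list (the steady value of B's rolling window)
def pvLastN (m : Nat) (l : List String) : List String := l.drop (l.length - m)

-- the terms B's streaming pass emits, in emission order, starting from window w
def pvWins (m : Nat) : List String → List String → List String
  | _, [] => []
  | w, t :: rest =>
    (if m ≤ w.length + 1 then [PySem.Str.join " " (pvLastN m (w ++ [t]))] else []) ++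
      pvWins m (pvLastN m (w ++ [t])) rest

theorem pvLastN_length (m : Nat) (l : List String) : (pvLastN m l).length = l.length - (l.length - m) := by
  simp [pvLastN]

theorem pvLastN_append_pvLastN (m : Nat) (x y : List String) :
    pvLastN m (pvLastN m x ++ y) = pvLastN m (x ++ y) := by
  unfold pvLastN
  rw [show x.drop (x.length - m) ++ y = (x ++ y).drop (x.length - m) from
    (List.drop_append_of_le_length (by omega)).symm]
  rw [List.drop_drop]
  congr 1
  simp only [List.length_append, List.length_drop]
  omega

theorem pvLastN_trim (m : Nat) (l : List String) (h : l.length ≤ m + 1) :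
    (if (l.length : Int) > (m : Int) then l.drop 1 else l) = pvLastN m l := by
  have h2 : ((l.length : Int) > (m : Int)) ↔ m < l.length := by exact_mod_cast Iff.rfl
  unfold pvLastN
  split_ifs with hgt
  · rw [h2] at hgt
    rw [show l.length - m = 1 from by omega]
  · rw [h2] at hgt
    rw [show l.length - m = 0 from by omega, List.drop_zero]

-- invariant of B's fold: first component = fold of Set.add over the emitted terms
theorem foldB (n : Int) (m : Nat) (hnm : n = (m : Int)) (doc : List String) :
    ∀ (w : List String) (s : PySem.Set String), w.length ≤ m →
    (doc.foldl
      (fun (st : PySem.Set String × List String) token =>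
        let w1 := st.2 ++ [token]
        let w2 := if (w1.length : Int) > n then w1.drop 1 else w1
        if (w2.length : Int) = n then (PySem.Set.add st.1 (PySem.Str.join " " w2), w2)
        else (st.1, w2))
      (s, w)).1 = (pvWins m w doc).foldl (fun t x => PySem.Set.add t x) s := by
  induction doc with
  | nil => intro w s _; rfl
  | cons t rest ih =>
    intro w s hw
    rw [List.foldl_cons]
    have hlen : (w ++ [t]).length ≤ m + 1 := by simp; omega
    have htrim : (if ((w ++ [t]).length : Int) > n then (w ++ [t]).drop 1 else (w ++ [t]))
        = pvLastN m (w ++ [t]) := by rw [hnm]; exact pvLastN_trim m _ hlen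
    have hw' : (pvLastN m (w ++ [t])).length ≤ m := by
      rw [pvLastN_length]; omega
    have hlw' : (pvLastN m (w ++ [t])).length = (w ++ [t]).length - ((w ++ [t]).length - m) :=
      pvLastN_length m _
    show (rest.foldl _ (let w1 := w ++ [t];
        let w2 := if (w1.length : Int) > n then w1.drop 1 else w1;
        if (w2.length : Int) = n then (PySem.Set.add s (PySem.Str.join " " w2), w2)
        else (s, w2))).1 = _
    simp only [htrim]
    unfold pvWins
    rw [List.foldl_append]
    by_cases hcond : m ≤ w.length + 1
    · have hc : ((pvLastN m (w ++ [t])).length : Int) = n := by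
        rw [hnm]; simp at hlw' ⊢; omega
      rw [if_pos hc, if_pos hcond]
      rw [ih _ _ hw']
      rfl
    · have hc : ¬ ((pvLastN m (w ++ [t])).length : Int) = n := by
        rw [hnm]; simp at hlw' ⊢; omega
      rw [if_neg hc, if_neg hcond]
      rw [ih _ _ hw']
      rfl

-- closed form for the emitted terms
theorem pvWins_closed (m : Nat) (doc : List String) :
    ∀ w : List String,
    pvWins m w doc = (List.range doc.length).filterMap
      (fun j => if m ≤ w.length + j + 1 then
        some (PySem.Str.join " " (pvLastN m (w ++ doc.take (j + 1)))) else none) := by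
  induction doc with
  | nil => intro w; rfl
  | cons t rest ih =>
    intro w
    unfold pvWins
    rw [ih (pvLastN m (w ++ [t]))]
    simp only [List.length_cons]
    rw [List.range_succ_eq_map, List.filterMap_cons, List.filterMap_map]
    have hlw' : (pvLastN m (w ++ [t])).length = (w ++ [t]).length - ((w ++ [t]).length - m) :=
      pvLastN_length m _
    have hmain : ∀ j : Nat,
        (if m ≤ (pvLastN m (w ++ [t])).length + j + 1 then
          some (PySem.Str.join " " (pvLastN m (pvLastN m (w ++ [t]) ++ rest.take (j + 1)))) else none)
        = (if m ≤ w.length + (j + 1) + 1 then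
          some (PySem.Str.join " " (pvLastN m (w ++ t :: rest.take (j + 1)))) else none) := by
      intro j
      have hcond : (m ≤ (pvLastN m (w ++ [t])).length + j + 1) ↔ (m ≤ w.length + (j + 1) + 1) := by
        simp at hlw'; omega
      have hval : pvLastN m (pvLastN m (w ++ [t]) ++ rest.take (j + 1))
          = pvLastN m (w ++ t :: rest.take (j + 1)) := by
        rw [pvLastN_append_pvLastN]
        congr 1
        simp
      by_cases hc : m ≤ w.length + (j + 1) + 1
      · rw [if_pos (hcond.mpr hc), if_pos hc, hval]
      · rw [if_neg (fun h => hc (hcond.mp h)), if_neg hc]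
    by_cases h0 : m ≤ w.length + 0 + 1
    · rw [if_pos (by omega : m ≤ w.length + 1), if_pos h0]
      rw [List.singleton_append]
      congr 1
      apply List.filterMap_congr
      intro j _
      simp only [Function.comp_apply, Nat.succ_eq_add_one]
      exact hmain j
    · rw [if_neg (by omega : ¬ m ≤ w.length + 1), if_neg h0]
      rw [List.nil_append]
      apply List.filterMap_congr
      intro j _
      simp only [Function.comp_apply, Nat.succ_eq_add_one]
      exact hmain j

-- the filterMap over range with a tail condition is a map over a shorter range
theorem filterMap_range_if {α : Type} (m : Nat) (hm : 1 ≤ m) (F : Nat → α) :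
    ∀ L : Nat, (List.range L).filterMap
        (fun j => if m ≤ j + 1 then some (F (j + 1)) else none)
      = (List.range (L + 1 - m)).map (fun k => F (k + m)) := by
  intro L
  induction L with
  | zero => rw [show 0 + 1 - m = 0 from by omega]; rfl
  | succ L ih =>
    rw [List.range_succ, List.filterMap_append, ih]
    by_cases h : m ≤ L + 1
    · rw [show L + 1 + 1 - m = (L + 1 - m) + 1 from by omega, List.range_succ, List.map_append]
      simp only [List.filterMap_cons, if_pos h, List.filterMap_nil, List.map_cons, List.map_nil]
      rw [show L + 1 - m + m = L + 1 from by omega]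
    · rw [show L + 1 + 1 - m = L + 1 - m from by omega]
      simp only [List.filterMap_cons, if_neg h, List.filterMap_nil, List.append_nil]

theorem window_pair (document : List String) (k : Nat) (h : k + 1 < document.length) :
    (document.drop k).take 2 = [document[k], document[k + 1]] := by
  rw [List.drop_eq_getElem_cons (by omega : k < document.length)]
  rw [List.drop_eq_getElem_cons h]
  rfl

theorem window_triple (document : List String) (k : Nat) (h : k + 2 < document.length) :
    (document.drop k).take 3 = [document[k], document[k + 1], document[k + 2]] := by
  rw [List.drop_eq_getElem_cons (by omega : k < document.length)]
  rw [List.drop_eq_getElem_cons (by omega : k + 1 < document.length)]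
  rw [List.drop_eq_getElem_cons h]
  rfl

theorem pvLastN_take (m : Nat) (doc : List String) (k : Nat) (h : k + m ≤ doc.length) :
    pvLastN m (doc.take (k + m)) = (doc.drop k).take m := by
  unfold pvLastN
  rw [List.length_take, show min (k + m) doc.length - m = k from by omega]
  rw [List.drop_take]
  congr 1
  omega

-- fold of Set.add over a list is Set.ofList of that list
theorem foldl_add_eq_ofList (l : List String) :
    l.foldl (fun t x => PySem.Set.add t x) PySem.Set.empty = PySem.Set.ofList l := by
  rw [PySem.Set.ofList_eq_foldl]
  rfl

-- A's fold for n = 2 / n = 3, as Set.ofList of the mapped windows (reused shape from the range massage)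
theorem foldl_add_eq_ofList_map {α : Type} (l : List α) (f : α → String) :
    l.foldl (fun t x => PySem.Set.add t (f x)) PySem.Set.empty = PySem.Set.ofList (l.map f) := by
  rw [PySem.Set.ofList_eq_foldl, List.foldl_map]
  rfl

-- ===== VERDICT (by name: the statement is the Claim_ definition above) =====
theorem generate_terms_spec : Claim_equal_generate_terms := by
  intro document n _ hpre
  unfold Spec_generate_terms generate_terms generate_terms_alt
  rcases hpre with h1 | h2 | h3
  · subst h1; rw [if_pos rfl, if_pos rfl]
  · subst h2
    rw [if_neg (by norm_num), if_pos rfl, if_neg (by norm_num),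
      if_neg (by simp : ¬ ¬ ((2 : Int) = 2 ∨ (2 : Int) = 3))]
    rw [foldB 2 2 (by norm_num) document [] PySem.Set.empty (by simp)]
    rw [pvWins_closed 2 document []]
    simp only [List.length_nil, List.nil_append, Nat.zero_add]
    rw [filterMap_range_if 2 (by norm_num) (fun k => PySem.Str.join " " (pvLastN 2 (document.take k))) document.length]
    rw [foldl_add_eq_ofList_map, foldl_add_eq_ofList]
    congr 1
    rw [PySem.List.pyRange_one]
    simp only [PySem.List.len_eq]
    have hlen : ((document.length : Int) - 1).toNat = document.length + 1 - 2 := by omega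
    rw [hlen, List.map_map]
    apply List.map_congr_left
    intro k hk
    have hkb : k + 1 < document.length := by
      have := List.mem_range.mp hk; omega
    simp only [Function.comp]
    rw [pvLastN_take 2 document k (by omega), window_pair document k hkb]
    have e1 : (1 : Int) + (k : Int) - 1 = ((k : Nat) : Int) := by ring
    rw [e1]
    have g1 : PySem.List.pyGetD document ((k : Nat) : Int) "" = document[k] := by
      rw [PySem.List.pyGetD_natCast]; exact List.getD_eq_getElem _ _ (by omega)
    have g2 : PySem.List.pyGetD document ((1 : Int) + (k : Int)) "" = document[k + 1] := by
      rw [show (1 : Int) + (k : Int) = ((k + 1 : Nat) : Int) from by push_cast; ring,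
        PySem.List.pyGetD_natCast]
      exact List.getD_eq_getElem _ _ (by omega)
    rw [g1, g2]
  · subst h3
    rw [if_neg (by norm_num), if_neg (by norm_num), if_pos rfl, if_neg (by norm_num),
      if_neg (by simp : ¬ ¬ ((3 : Int) = 2 ∨ (3 : Int) = 3))]
    rw [foldB 3 3 (by norm_num) document [] PySem.Set.empty (by simp)]
    rw [pvWins_closed 3 document []]
    simp only [List.length_nil, List.nil_append, Nat.zero_add]
    rw [filterMap_range_if 3 (by norm_num) (fun k => PySem.Str.join " " (pvLastN 3 (document.take k))) document.length]
    rw [foldl_add_eq_ofList_map, foldl_add_eq_ofList]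
    congr 1
    rw [PySem.List.pyRange_one]
    simp only [PySem.List.len_eq]
    have hlen : ((document.length : Int) - 2).toNat = document.length + 1 - 3 := by omega
    rw [hlen, List.map_map]
    apply List.map_congr_left
    intro k hk
    have hkb : k + 2 < document.length := by
      have := List.mem_range.mp hk; omega
    simp only [Function.comp]
    rw [pvLastN_take 3 document k (by omega), window_triple document k hkb]
    have e1 : (2 : Int) + (k : Int) - 2 = ((k : Nat) : Int) := by ring
    have e2 : (2 : Int) + (k : Int) - 1 = ((k : Nat) : Int) + 1 := by ring
    rw [e1, e2]
    have g1 : PySem.List.pyGetD document ((k : Nat) : Int) "" = document[k] := by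
      rw [PySem.List.pyGetD_natCast]; exact List.getD_eq_getElem _ _ (by omega)
    have g2 : PySem.List.pyGetD document (((k : Nat) : Int) + 1) "" = document[k + 1] := by
      rw [show ((k : Nat) : Int) + 1 = ((k + 1 : Nat) : Int) from by push_cast; ring,
        PySem.List.pyGetD_natCast]
      exact List.getD_eq_getElem _ _ (by omega)
    have g3 : PySem.List.pyGetD document ((2 : Int) + (k : Int)) "" = document[k + 2] := by
      rw [show (2 : Int) + (k : Int) = ((k + 2 : Nat) : Int) from by push_cast; ring,
        PySem.List.pyGetD_natCast]
      exact List.getD_eq_getElem _ _ (by omega)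
    rw [g1, g2, g3]
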